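-- pv_equiv track=rewrite | github.com/520wsl/python-test | test02/新浪读书.py | from_list_get_id
-- ===== SOURCE A (Python) =====
-- def from_list_get_id(id_list, id):
--     nid = 0
--     if (len(id_list)) <= 0:
--         return nid
--     for item in id_list:
--         if id in item:
--             nid = item[0]
--     return nid
-- ===== SOURCE B (Python) =====
-- def from_list_get_id(id_list, id):
--     for item in reversed(id_list):
--         if id in item:
--             return item[0]
--     return 0
-- ===== Notes on version B (the rewrite author's own statement) =====
-- stated objective: simpler
-- what changed: Replaces the forward scan that keeps overwriting an accumulator (plus an explicit empty-list guard) with a reverse scan that returns at the first match, defaulting to 0.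
import Mathlib
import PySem

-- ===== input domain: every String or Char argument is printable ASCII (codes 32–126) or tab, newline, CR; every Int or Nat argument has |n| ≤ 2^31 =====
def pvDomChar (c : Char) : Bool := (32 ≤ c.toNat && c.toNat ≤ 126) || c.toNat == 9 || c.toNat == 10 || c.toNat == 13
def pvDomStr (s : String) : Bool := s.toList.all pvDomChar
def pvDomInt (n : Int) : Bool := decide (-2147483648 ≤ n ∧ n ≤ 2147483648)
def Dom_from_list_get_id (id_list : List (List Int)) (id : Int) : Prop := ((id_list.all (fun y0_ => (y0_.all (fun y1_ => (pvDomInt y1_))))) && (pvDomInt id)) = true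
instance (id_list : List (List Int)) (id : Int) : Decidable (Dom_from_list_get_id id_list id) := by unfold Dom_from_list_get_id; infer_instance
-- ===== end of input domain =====

-- B replaces A's forward scan with an accumulator by a reverse scan with early return (simpler decomposition, same cost).


-- ===== PORT A =====
-- forward loop: nid starts at 0, each matching item overwrites it with item[0]
def from_list_get_id (id_list : List (List Int)) (id : Int) : Int :=
  let nid : Int := 0
  if id_list.length ≤ 0 then nid
  else
    id_list.foldl (fun nid item =>
      if item.contains id then ((PySem.List.pyGet? item 0).getD 0) else nid) nid

-- ===== PORT B =====
-- reverse scan, return first match's item[0], else 0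
def fromListGetIdRev (id : Int) : List (List Int) → Int
  | [] => 0
  | item :: rest =>
    if item.contains id then ((PySem.List.pyGet? item 0).getD 0)
    else fromListGetIdRev id rest

def from_list_get_id_alt (id_list : List (List Int)) (id : Int) : Int :=
  fromListGetIdRev id id_list.reverse

-- ===== PRECONDITION & SPEC =====
def Spec_from_list_get_id (id_list : List (List Int)) (id : Int) (out : Int) : Prop := out = from_list_get_id_alt id_list id
instance (id_list : List (List Int)) (id : Int) (out : Int) : Decidable (Spec_from_list_get_id id_list id out) := by unfold Spec_from_list_get_id; infer_instance

-- ===== CLAIM (what is proved, stated in full; the proofs are below) =====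
def Claim_equal_from_list_get_id : Prop := ∀ (id_list : List (List Int)) (id : Int), Dom_from_list_get_id id_list id → Spec_from_list_get_id id_list id (from_list_get_id id_list id)

-- ===== LEMMAS AND PROOFS =====

theorem fromListGetIdRev_append (id : Int) (l1 l2 : List (List Int)) :
    fromListGetIdRev id (l1 ++ l2) =
      if l1.any (fun it => it.contains id) then fromListGetIdRev id l1
      else fromListGetIdRev id l2 := by
  induction l1 with
  | nil => simp
  | cons a t ih =>
    by_cases h : id ∈ a <;> simp [fromListGetIdRev, h, ih]

theorem foldl_eq_rev (id : Int) (xs : List (List Int)) (nid : Int) :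
    xs.foldl (fun nid item =>
        if item.contains id then ((PySem.List.pyGet? item 0).getD 0) else nid) nid =
      if xs.any (fun it => it.contains id) then fromListGetIdRev id xs.reverse else nid := by
  induction xs generalizing nid with
  | nil => simp
  | cons a t ih =>
    simp only [List.foldl_cons, List.reverse_cons, fromListGetIdRev_append, ih,
      List.any_cons, List.any_reverse]
    by_cases ht : ∃ x ∈ t, id ∈ x <;>
      by_cases ha : id ∈ a <;>
      simp [ht, ha, fromListGetIdRev]

theorem rev_no_match (id : Int) (xs : List (List Int))
    (h : xs.any (fun it => it.contains id) = false) :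
    fromListGetIdRev id xs = 0 := by
  induction xs with
  | nil => rfl
  | cons a t ih =>
    simp only [List.any_cons, Bool.or_eq_false_iff] at h
    have h2 := ih h.2
    have h1 : id ∉ a := by simpa using h.1
    simp [fromListGetIdRev, h1, h2]

-- ===== VERDICT (by name: the statement is the Claim_ definition above) =====
theorem from_list_get_id_spec : Claim_equal_from_list_get_id := by
  intro xs id _
  unfold Spec_from_list_get_id from_list_get_id from_list_get_id_alt
  by_cases hlen : xs.length ≤ 0
  · have : xs = [] := List.eq_nil_of_length_eq_zero (by omega)
    simp [this, fromListGetIdRev]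
  · simp only [hlen, if_false, foldl_eq_rev]
    by_cases h : ∃ x ∈ xs, id ∈ x
    · simp [h]
    · have hb : (xs.reverse.any fun it => it.contains id) = false := by
        simpa using h
      simp [h, rev_no_match id xs.reverse hb]
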